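-- pv_equiv track=rewrite | github.com/mocanumaxim813-boop/informatica_12c | fisa 30 09 25 MM.py | cifre_diferente
-- ===== SOURCE A (Python) =====
-- def cifre_diferente(x, y):
--     cifre_x = []
--     cifre_y = []
--     for c in str(x):
--         if c not in cifre_x:
--             cifre_x.append(c)
--     for c in str(y):
--         if c not in cifre_y:
--             cifre_y.append(c)
--
--     diferenta = []
--     for c in cifre_x:
--         if c not in cifre_y:
--             diferenta.append(c)
--     return diferenta
-- ===== SOURCE B (Python) =====
-- def cifre_diferente(x, y):
--     s = str(x)
--     keep = set(s) - set(str(y))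
--     return sorted(keep, key=s.index)
-- ===== Notes on version B (the rewrite author's own statement) =====
-- stated objective: idiomatic
-- what changed: Instead of A's three sequential dedup/filter scans that build the output left-to-right, B computes the unordered set difference set(str(x)) - set(str(y)) in one step and then RECONSTRUCTS first-appearance order by sorting the surviving characters by their first index in str(x) (sorted(keep, key=s.index)); correct because distinct characters have distinct first indices, so the key order is exactly first-appearance order.
import Mathlib
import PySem

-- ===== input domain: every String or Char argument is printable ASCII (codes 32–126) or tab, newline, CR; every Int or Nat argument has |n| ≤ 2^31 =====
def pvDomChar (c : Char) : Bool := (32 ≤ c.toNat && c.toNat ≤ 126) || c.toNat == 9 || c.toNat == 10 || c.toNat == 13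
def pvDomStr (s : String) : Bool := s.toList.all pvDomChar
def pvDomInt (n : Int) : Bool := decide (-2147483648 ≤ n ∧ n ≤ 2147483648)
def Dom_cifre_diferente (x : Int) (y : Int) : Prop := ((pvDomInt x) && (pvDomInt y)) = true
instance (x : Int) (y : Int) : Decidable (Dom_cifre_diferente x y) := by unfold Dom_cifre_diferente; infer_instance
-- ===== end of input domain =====

-- B replaces A's three dedup/filter scans by an unordered set difference followed by a
-- sort on first index in str(x), which reconstructs first-appearance order (objective:
-- idiomatic); same return value everywhere.

-- ===== PORT A =====
-- Python list elements are 1-char strings; we compute over Char and wrap each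
-- character as a 1-char String at the end (type convention only).
def cifre_diferente (x : Int) (y : Int) : List String :=
  let cifre_x := (PySem.Int.toChars x).foldl (fun acc c => if c ∈ acc then acc else acc ++ [c]) []
  let cifre_y := (PySem.Int.toChars y).foldl (fun acc c => if c ∈ acc then acc else acc ++ [c]) []
  let diferenta := cifre_x.foldl (fun acc c => if c ∈ cifre_y then acc else acc ++ [c]) []
  diferenta.map (fun c => String.ofList [c])

-- ===== PORT B =====
-- key s.index c: every element of keep is a character of s, so Python's s.index never
-- raises here; the '.getD 0' default is never used (exact on all sorted inputs).
def cifre_diferente_alt (x : Int) (y : Int) : List String :=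
  let s := PySem.Int.toChars x
  let keep := PySem.Set.diff (PySem.Set.ofList s) (PySem.Set.ofList (PySem.Int.toChars y))
  (PySem.List.sorted keep (fun c => (PySem.List.index? s c).getD 0) false).map
    (fun c => String.ofList [c])

-- ===== PRECONDITION & SPEC =====
def Spec_cifre_diferente (x : Int) (y : Int) (out : List String) : Prop := out = cifre_diferente_alt x y
instance (x : Int) (y : Int) (out : List String) : Decidable (Spec_cifre_diferente x y out) := by unfold Spec_cifre_diferente; infer_instance

-- ===== CLAIM (what is proved, stated in full; the proofs are below) =====
def Claim_equal_cifre_diferente : Prop := ∀ (x : Int) (y : Int), Dom_cifre_diferente x y → Spec_cifre_diferente x y (cifre_diferente x y)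

-- ===== LEMMAS AND PROOFS =====

-- A's dedup fold IS PySem.Set.ofList (the Prop-membership test equals the Bool contains test)
lemma dedup_fold_eq_ofList (xs : List Char) :
    xs.foldl (fun acc c => if c ∈ acc then acc else acc ++ [c]) [] = PySem.Set.ofList xs := by
  rw [PySem.Set.ofList_eq_foldl]
  apply PySem.List.foldl_congr_mem
  intro acc c _
  by_cases h : c ∈ acc <;> simp [PySem.Set.add, h]

-- A's third loop is a filter
lemma foldl_filter_mem (L : List Char) (ys : List Char) :
    L.foldl (fun acc c => if c ∈ ys then acc else acc ++ [c]) []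
      = L.filter (fun c => !(decide (c ∈ ys))) := by
  have := PySem.List.foldl_append_ite_eq_filter (l := L) (p := fun c => ¬ (c ∈ ys)) (acc := [])
  simpa using this

-- each member of s has a first index below s.length
lemma idx_lt_length (s : List Char) (a : Char) (h : a ∈ s) :
    (PySem.List.index? s a).getD 0 < s.length := by
  have hs : (PySem.List.index? s a).isSome := (PySem.List.index?_isSome_iff s a).2 h
  obtain ⟨k, hk⟩ := Option.isSome_iff_exists.1 hs
  obtain ⟨hlt, -, -⟩ := PySem.List.getElem_of_index?_eq_some hk
  rw [hk]
  simpa using hlt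

-- the ordered dedup of s is strictly increasing in first index in s
lemma ofList_pairwise_idx (s : List Char) :
    (PySem.Set.ofList s).Pairwise
      (fun a b => (PySem.List.index? s a).getD 0 < (PySem.List.index? s b).getD 0) := by
  induction s using List.reverseRecOn with
  | nil => simp [PySem.Set.ofList]
  | append_singleton t c ih =>
    have hfold : PySem.Set.ofList (t ++ [c]) = PySem.Set.add (PySem.Set.ofList t) c := by
      rw [PySem.Set.ofList_eq_foldl, PySem.Set.ofList_eq_foldl, List.foldl_append]
      rfl
    have hmem : ∀ a : Char, a ∈ PySem.Set.ofList t → a ∈ t := by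
      intro a ha; exact (PySem.Set.mem_ofList _ _).1 ha
    have hidx : ∀ a : Char, a ∈ t →
        PySem.List.index? (t ++ [c]) a = PySem.List.index? t a := by
      intro a ha; exact PySem.List.index?_append_of_mem [c] ha
    by_cases hc : c ∈ PySem.Set.ofList t
    · rw [hfold, PySem.Set.add, if_pos ((PySem.Set.contains_iff _ _).2 hc)]
      refine ih.imp_of_mem ?_
      intro a b ha hb hab
      rwa [hidx a (hmem a ha), hidx b (hmem b hb)]
    · have hct : c ∉ t := fun h => hc ((PySem.Set.mem_ofList _ _).2 h)
      rw [hfold, PySem.Set.add, if_neg (by simp [hc])]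
      rw [List.pairwise_append]
      refine ⟨?_, by simp, ?_⟩
      · refine ih.imp_of_mem ?_
        intro a b ha hb hab
        rwa [hidx a (hmem a ha), hidx b (hmem b hb)]
      · intro a ha b hb
        have hb' : b = c := by simpa using hb
        subst hb'
        rw [hidx a (hmem a ha), PySem.List.index?_append_singleton_self t b hct]
        simpa using idx_lt_length t a (hmem a ha)

-- ===== VERDICT (by name: the statement is the Claim_ definition above) =====
theorem cifre_diferente_spec : Claim_equal_cifre_diferente := by
  intro x y _
  unfold Spec_cifre_diferente cifre_diferente cifre_diferente_alt
  simp only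
  congr 1
  set s := PySem.Int.toChars x with hs
  set ys := PySem.Int.toChars y with hys
  -- A's list of kept characters
  rw [dedup_fold_eq_ofList s, dedup_fold_eq_ofList ys, foldl_filter_mem]
  -- B's keep list is the same filter
  have hkeep : PySem.Set.diff (PySem.Set.ofList s) (PySem.Set.ofList ys)
      = (PySem.Set.ofList s).filter (fun c => !(decide (c ∈ PySem.Set.ofList ys))) := by
    simp [PySem.Set.diff]
  rw [hkeep]
  -- the filtered list is strictly key-increasing, so sorting it by the key is the identity
  exact (PySem.List.sorted_eq_of_perm_of_pairwise_lt _ _ _ (List.Perm.refl _)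
    ((ofList_pairwise_idx s).filter _)).symm
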